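-- pv_equiv track=rewrite | github.com/SauravSinha76/scaler2 | class57/perfect_number.py | solve
-- ===== SOURCE A (Python) =====
-- from collections import deque
--
-- def solve(A):
--     queue = deque()
--     queue.append("")
--     count = 0
--
--     while count <= A:
--         x = queue.popleft()
--         ele = x + '1'
--         count += 1
--         if count == A:
--             return ele + ele[::-1]
--         queue.append(ele)
--
--         ele = x + '2'
--         count += 1
--         if count == A:
--             return ele + ele[::-1]
--         queue.append(ele)
-- ===== SOURCE B (Python) =====
-- def solve(A):
--     # A-th string over {'1','2'} in BFS/length-lex order is the bijective base-2
--     # numeral of A; return it concatenated with its reverse (even palindrome).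
--     s = []
--     n = A
--     while n > 0:
--         n -= 1
--         s.append('1' if n % 2 == 0 else '2')
--         n //= 2
--     s.reverse()
--     half = ''.join(s)
--     return half + half[::-1]
-- ===== Notes on version B (the rewrite author's own statement) =====
-- stated objective: faster
-- what changed: Replaces the O(A) BFS queue enumeration with a direct O(log A) computation of A's bijective base-2 numeral (digits 1/2), then mirrors it into the palindrome.
-- outside the precondition, e.g. on solve(0): A returns None, B returns ''
import Mathlib
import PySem

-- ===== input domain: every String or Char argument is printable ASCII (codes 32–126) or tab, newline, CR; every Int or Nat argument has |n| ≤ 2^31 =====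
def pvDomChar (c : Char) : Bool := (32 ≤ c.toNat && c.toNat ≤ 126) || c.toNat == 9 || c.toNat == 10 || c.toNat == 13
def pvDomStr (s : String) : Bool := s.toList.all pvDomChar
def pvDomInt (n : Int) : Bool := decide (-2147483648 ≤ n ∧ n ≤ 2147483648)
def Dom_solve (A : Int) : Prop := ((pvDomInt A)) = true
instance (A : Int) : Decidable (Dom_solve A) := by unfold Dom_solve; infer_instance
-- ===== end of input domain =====

-- B replaces A's O(A) BFS queue enumeration by directly computing the bijective
-- base-2 numeral of A (objective: faster); equivalence of the return value on A ≥ 1.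

-- ===== PORT A =====
-- the while loop: pops one string, pushes two, count advances by 2 per iteration;
-- returns none when the loop exits without returning (Python returns None there).
-- Python's deque is ported as the standard two-list functional queue:
-- popleft takes from `front`, append pushes onto `back`; none = popleft from empty deque
def popleft (front back : List String) : Option (String × List String × List String) :=
  match front with
  | x :: rest => some (x, rest, back)
  | [] =>
    match back.reverse with
    | [] => none
    | x :: rest => some (x, rest, [])

-- fuel is only a structural-recursion totality guard; solve passes enough for every A
def solveLoop : Nat → Int → List String → List String → Int → Option String
  | 0, _, _, _, _ => none
  | fuel + 1, A, front, back, count =>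
    if count ≤ A then
      match popleft front back with
      | none => none   -- popleft from an empty deque (unreachable from solve's initial state)
      | some (x, front', back') =>
        let ele1 := x ++ "1"
        if count + 1 = A then some (ele1 ++ String.ofList ele1.toList.reverse)
        else
          let ele2 := x ++ "2"
          if count + 2 = A then some (ele2 ++ String.ofList ele2.toList.reverse)
          else solveLoop fuel A front' (ele2 :: ele1 :: back') (count + 2)
    else none

def solve (A : Int) : String :=
  -- Python returns None when the loop falls through (only for A ≤ 0, outside Pre_);
  -- the String-typed port returns "" there.
  (solveLoop (A.toNat + 1) A [""] [] 0).getD ""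

-- ===== PORT B =====
-- fuel is only a structural-recursion totality guard; solve_alt passes enough for every A
def bijLoop : Nat → Int → List Char → List Char
  | 0, _, s => s
  | fuel + 1, n, s =>
    if n > 0 then
      let m := n - 1
      bijLoop fuel (PySem.Int.floordiv m 2) (s ++ [if PySem.Int.mod m 2 = 0 then '1' else '2'])
    else s

def solve_alt (A : Int) : String :=
  let s := bijLoop (A.toNat + 1) A []
  let half := String.ofList s.reverse
  half ++ String.ofList half.toList.reverse

-- ===== PRECONDITION & SPEC =====
-- Pre_ excludes A ≤ 0, where the Python A's loop falls through and returns None (not a str).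
def Pre_solve (A : Int) : Prop := 1 ≤ A
instance (A : Int) : Decidable (Pre_solve A) := by unfold Pre_solve; infer_instance
def pvWitness_solve : Int := (5)
def Spec_solve (A : Int) (out : String) : Prop := out = solve_alt A
instance (A : Int) (out : String) : Decidable (Spec_solve A out) := by unfold Spec_solve; infer_instance

-- ===== CLAIM (what is proved, stated in full; the proofs are below) =====
def Claim_equal_solve : Prop := ∀ (A : Int), Dom_solve A → Pre_solve A → Spec_solve A (solve A)

-- ===== LEMMAS AND PROOFS =====

-- the n-th string over {'1','2'} in BFS/length-lex order: bijective base-2 numeral of n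
def rep : Nat → List Char
  | 0 => []
  | n + 1 => rep (n / 2) ++ [if n % 2 = 0 then '1' else '2']

lemma rep_odd (m : Nat) : rep (2 * m + 1) = rep m ++ ['1'] := by
  rw [show 2 * m + 1 = (2 * m) + 1 from rfl, rep]
  simp [Nat.mul_mod_right]

lemma rep_even (m : Nat) : rep (2 * m + 2) = rep m ++ ['2'] := by
  rw [show 2 * m + 2 = (2 * m + 1) + 1 from rfl, rep]
  have h1 : (2 * m + 1) / 2 = m := by omega
  have h2 : (2 * m + 1) % 2 = 1 := by omega
  simp [h1, h2]

lemma bijLoop_nat : ∀ (fuel m : Nat), m ≤ fuel → ∀ s, bijLoop fuel (m : Int) s = s ++ (rep m).reverse := by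
  intro fuel
  induction fuel with
  | zero => intro m hm s; interval_cases m; simp [bijLoop, rep]
  | succ f ih =>
    intro m hm s
    match m with
    | 0 => simp [bijLoop, rep]
    | k + 1 =>
      rw [bijLoop]
      have hpos : ((k + 1 : Nat) : Int) > 0 := by exact_mod_cast Nat.succ_pos k
      simp only [hpos, if_pos]
      have hm : ((k + 1 : Nat) : Int) - 1 = (k : Int) := by push_cast; ring
      rw [hm]
      have hdiv : PySem.Int.floordiv (k : Int) 2 = ((k / 2 : Nat) : Int) := by
        exact_mod_cast PySem.Int.floordiv_natCast k 2
      have hmod : PySem.Int.mod (k : Int) 2 = ((k % 2 : Nat) : Int) := by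
        exact_mod_cast PySem.Int.mod_natCast k 2
      rw [hdiv, hmod, ih (k / 2) (by omega)]
      have hd : (if ((k % 2 : Nat) : Int) = 0 then '1' else '2')
          = (if k % 2 = 0 then '1' else '2') := by
        by_cases h : k % 2 = 0 <;> simp [h]
        omega
      rw [hd, rep]
      simp

lemma popleft_spec (front back : List String) (x : String) (t : List String)
    (h : front ++ back.reverse = x :: t) :
    ∃ f' b', popleft front back = some (x, f', b') ∧ f' ++ b'.reverse = t := by
  cases front with
  | nil =>
    simp only [List.nil_append] at h
    exact ⟨t, [], by simp [popleft, h], by simp⟩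
  | cons y rest =>
    simp only [List.cons_append, List.cons.injEq] at h
    exact ⟨rest, back, by simp [popleft, h.1], h.2⟩

-- queue invariant: at count = 2*j the deque holds the reps of j..2j, in order
lemma solveLoop_eq (A : Int) : ∀ fuel (j : Nat) (front back : List String),
    front ++ back.reverse = (List.range' j (j + 1)).map (fun i => String.ofList (rep i)) →
    (A - 2 * (j : Int)).toNat ≤ fuel → (2 * (j : Int)) < A →
    solveLoop fuel A front back (2 * (j : Int)) =
      some (String.ofList (rep A.toNat) ++ String.ofList (rep A.toNat).reverse) := by
  intro fuel
  induction fuel with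
  | zero => intro j _ _ _ hf hlt; omega
  | succ f ih =>
    intro j front back hQ hf hlt
    rw [solveLoop.eq_def]
    have hle : 2 * (j : Int) ≤ A := le_of_lt hlt
    simp only [hle, if_pos]
    rw [List.range'_succ, List.map_cons] at hQ
    obtain ⟨f', b', hpop, hT⟩ := popleft_spec _ _ _ _ hQ
    rw [hpop]
    have he1 : String.ofList (rep j) ++ "1" = String.ofList (rep (2 * j + 1)) := by
      rw [rep_odd, show ("1" : String) = String.ofList ['1'] from rfl]; simp
    have he2 : String.ofList (rep j) ++ "2" = String.ofList (rep (2 * j + 2)) := by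
      rw [rep_even, show ("2" : String) = String.ofList ['2'] from rfl]; simp
    by_cases h1 : 2 * (j : Int) + 1 = A
    · have hA : A.toNat = 2 * j + 1 := by omega
      simp only [h1, if_pos, he1, hA]
      simp
    · simp only [h1, ite_false]
      by_cases h2 : 2 * (j : Int) + 2 = A
      · have hA : A.toNat = 2 * j + 2 := by omega
        simp only [h2, if_pos, he1, he2, hA]
        simp
      · simp only [h2, ite_false]
        have hq : f' ++ ((String.ofList (rep j) ++ "2") :: (String.ofList (rep j) ++ "1") :: b').reverse
            = (List.range' (j + 1) (j + 2)).map (fun i => String.ofList (rep i)) := by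
          have r1 : List.range' (j + 1) (j + 2) = List.range' (j + 1) (j + 1) ++ [2 * j + 2] := by
            simpa [show j + 1 + (j + 1) = 2 * j + 2 by omega] using (List.range'_concat (s := j + 1) (n := j + 1) (step := 1))
          have r2 : List.range' (j + 1) (j + 1) = List.range' (j + 1) j ++ [2 * j + 1] := by
            simpa [show j + 1 + j = 2 * j + 1 by omega] using (List.range'_concat (s := j + 1) (n := j) (step := 1))
          rw [r1, r2]
          simp only [List.reverse_cons, List.append_assoc, List.map_append]
          rw [← List.append_assoc f' b'.reverse, hT]
          simp [he1, he2]
        have hc : 2 * (j : Int) + 2 = 2 * ((j + 1 : Nat) : Int) := by push_cast; ring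
        rw [hc]
        exact ih (j + 1) _ _ hq (by omega) (by omega)

theorem solve_spec : Claim_equal_solve := by
  intro A _hdom hpre
  unfold Spec_solve solve solve_alt
  have hA : (0 : Int) ≤ A := by exact_mod_cast hpre.trans' (by norm_num)
  have h0 : ([""] : List String) ++ ([] : List String).reverse
      = (List.range' 0 (0 + 1)).map (fun i => String.ofList (rep i)) := by
    simp [List.range'_succ, rep]
  have hc0 : (0 : Int) = 2 * ((0 : Nat) : Int) := by norm_num
  rw [hc0, solveLoop_eq A (A.toNat + 1) 0 [""] [] h0 (by omega) (by simpa using hpre)]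
  have hb := bijLoop_nat (A.toNat + 1) A.toNat (by omega) []
  rw [Int.toNat_of_nonneg hA] at hb
  rw [hb]
  simp
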